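-- pv_equiv track=rewrite | github.com/AkihiroFuruya/- | spam_mail_filter.py | judge_max_score_label
-- ===== SOURCE A (Python) =====
-- def judge_max_score_label(label2score):
--     label_list = []
--     for key_value in label2score.items():
--         if key_value[1] == min(label2score.values()):
--             label_list.append(key_value[0])
--     if len(label_list) == 1:
--         label = label_list[0]
--     else:
--         label = "Error"
--     return label
-- ===== SOURCE B (Python) =====
-- def judge_max_score_label(label2score):
--     items = sorted(label2score.items(), key=lambda kv: kv[1])
--     if not items:
--         return "Error"
--     if len(items) == 1 or items[0][1] != items[1][1]:
--         return items[0][0]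
--     return "Error"
-- ===== Notes on version B (the rewrite author's own statement) =====
-- stated objective: faster
-- what changed: Instead of scanning the dict and recomputing min(values) inside the loop, B sorts the items by score once and decides from the two smallest scores whether the minimum is unique.
import Mathlib
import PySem

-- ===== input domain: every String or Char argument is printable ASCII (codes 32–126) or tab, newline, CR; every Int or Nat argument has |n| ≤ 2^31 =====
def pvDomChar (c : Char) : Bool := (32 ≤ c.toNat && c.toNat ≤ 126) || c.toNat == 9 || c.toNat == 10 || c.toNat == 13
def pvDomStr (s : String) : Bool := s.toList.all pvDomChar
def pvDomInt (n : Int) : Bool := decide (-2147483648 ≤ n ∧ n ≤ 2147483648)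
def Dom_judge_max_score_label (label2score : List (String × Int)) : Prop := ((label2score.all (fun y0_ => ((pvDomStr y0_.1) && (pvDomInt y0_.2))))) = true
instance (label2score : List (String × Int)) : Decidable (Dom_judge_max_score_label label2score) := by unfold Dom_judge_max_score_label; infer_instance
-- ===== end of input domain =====

-- B sorts the items by score once and inspects only the two smallest scores, instead of
-- rescanning all values for the minimum at every loop step (objective: faster).


-- ===== PORT A =====
def judge_max_score_label (label2score : List (String × Int)) : String :=
  let d := PySem.Dict.ofList label2score
  let label_list := d.items.foldl (fun acc key_value =>
    if some key_value.2 = PySem.List.min? d.values (fun v => v) then acc ++ [key_value.1]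
    else acc) []
  if label_list.length = 1 then PySem.List.pyGetD label_list 0 "Error" else "Error"

-- ===== PORT B =====
def judge_max_score_label_alt (label2score : List (String × Int)) : String :=
  let items := PySem.List.sorted (PySem.Dict.ofList label2score).items (fun kv => kv.2) false
  match items with
  | [] => "Error"
  | [kv] => kv.1
  | kv1 :: kv2 :: _ => if kv1.2 ≠ kv2.2 then kv1.1 else "Error"

-- ===== PRECONDITION & SPEC =====
def Spec_judge_max_score_label (label2score : List (String × Int)) (out : String) : Prop := out = judge_max_score_label_alt label2score
instance (label2score : List (String × Int)) (out : String) : Decidable (Spec_judge_max_score_label label2score out) := by unfold Spec_judge_max_score_label; infer_instance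

-- ===== CLAIM (what is proved, stated in full; the proofs are below) =====
def Claim_equal_judge_max_score_label : Prop := ∀ (label2score : List (String × Int)), Dom_judge_max_score_label label2score → Spec_judge_max_score_label label2score (judge_max_score_label label2score)

-- ===== LEMMAS AND PROOFS =====

-- The head of the sorted item list carries exactly the minimum of the values.
theorem min_values_eq_head (ys : List (String × Int)) (kv1 : String × Int)
    (t : List (String × Int))
    (hs : PySem.List.sorted ys (fun kv => kv.2) false = kv1 :: t) :
    PySem.List.min? (ys.map Prod.snd) (fun v => v) = some kv1.2 := by
  have hperm : (PySem.List.sorted ys (fun kv => kv.2) false).Perm ys :=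
    PySem.List.sorted_perm ys _ false
  have hmem : kv1 ∈ ys := hperm.mem_iff.mp (by rw [hs]; exact List.mem_cons_self)
  have hne : ys.map Prod.snd ≠ [] := by
    intro h
    have : ys = [] := by cases ys <;> simp_all
    rw [this] at hs; simp [PySem.List.sorted] at hs
  obtain ⟨m, hm⟩ : ∃ m, PySem.List.min? (ys.map Prod.snd) (fun v => v) = some m := by
    cases h : PySem.List.min? (ys.map Prod.snd) (fun v => v) with
    | none => exact absurd ((PySem.List.min?_eq_none_iff (ys.map Prod.snd) (fun v => v)).mp h) hne
    | some m => exact ⟨m, rfl⟩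
  have hmmem : m ∈ ys.map Prod.snd := PySem.List.min?_mem hm
  obtain ⟨y, hy, hy2⟩ := List.mem_map.mp hmmem
  have h1 : kv1.2 ≤ m := by
    have := PySem.List.key_head_sorted_le ys Prod.snd hs y hy
    simpa [hy2] using this
  have h2 : m ≤ kv1.2 := by
    have := PySem.List.min?_isMin hm kv1.2 (List.mem_map.mpr ⟨kv1, hmem, rfl⟩)
    simpa using this
  rw [hm, le_antisymm h1 h2]

-- A's collected label list is the fst-projection of the min-filtered items.
theorem label_list_eq (ys : List (String × Int)) :
    ys.foldl (fun acc kv =>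
      if some kv.2 = PySem.List.min? (ys.map Prod.snd) (fun v => v) then acc ++ [kv.1]
      else acc) [] =
    ((ys.filter (fun kv => decide (some kv.2 = PySem.List.min? (ys.map Prod.snd) (fun v => v)))).map Prod.fst) := by
  have := PySem.List.foldl_append_if
    (fun kv => decide (some kv.2 = PySem.List.min? (ys.map Prod.snd) (fun v => v)))
    (Prod.fst) ys ([] : List String)
  simpa using this

-- core equivalence on an arbitrary item list
theorem core_eq (ys : List (String × Int)) :
    (let label_list := ys.foldl (fun acc kv =>
        if some kv.2 = PySem.List.min? (ys.map Prod.snd) (fun v => v) then acc ++ [kv.1]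
        else acc) [];
     if label_list.length = 1 then PySem.List.pyGetD label_list 0 "Error" else "Error") =
    (match PySem.List.sorted ys (fun kv => kv.2) false with
     | [] => "Error"
     | [kv] => kv.1
     | kv1 :: kv2 :: _ => if kv1.2 ≠ kv2.2 then kv1.1 else "Error") := by
  have hperm : (PySem.List.sorted ys (fun kv => kv.2) false).Perm ys :=
    PySem.List.sorted_perm ys _ false
  set q : String × Int → Bool :=
    fun kv => decide (some kv.2 = PySem.List.min? (ys.map Prod.snd) (fun v => v)) with hq
  have hfperm : (ys.filter q).Perm ((PySem.List.sorted ys (fun kv => kv.2) false).filter q) :=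
    (hperm.filter q).symm
  rw [label_list_eq ys, ← hq]
  cases hs : PySem.List.sorted ys (fun kv => kv.2) false with
  | nil =>
      have : ys = [] := by
        have := hperm.length_eq; rw [hs] at this; simpa using (List.length_eq_zero_iff.mp this.symm)
      subst this; simp
  | cons kv1 rest =>
      have hmin : PySem.List.min? (ys.map Prod.snd) (fun v => v) = some kv1.2 :=
        min_values_eq_head ys kv1 rest hs
      have hpair : (PySem.List.sorted ys (fun kv => kv.2) false).Pairwise (fun a b => a.2 ≤ b.2) :=
        PySem.List.sorted_pairwise ys _
      rw [hs] at hpair hfperm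
      have hq1 : q kv1 = true := by simp [hq, hmin]
      cases rest with
      | nil =>
          have h1 : ys.filter q = [kv1] := List.Perm.eq_singleton (by simpa [hq1] using hfperm)
          rw [h1]; simp
      | cons kv2 t =>
          by_cases hne : kv1.2 = kv2.2
          · -- two minimal scores: both sides give "Error"
            have hq2 : q kv2 = true := by simp [hq, hmin, hne]
            have hlen : 2 ≤ (ys.filter q).length := by
              have := hfperm.length_eq
              simp [hq1, hq2] at this
              omega
            rw [if_neg (by simp; omega)]; simp [hne]
          · -- unique minimum: both sides return kv1.1
            have hlt : ∀ y ∈ kv2 :: t, kv1.2 < y.2 := by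
              intro y hy
              have h12 : kv1.2 ≤ kv2.2 := (List.pairwise_cons.mp hpair).1 kv2 List.mem_cons_self
              have hlt12 : kv1.2 < kv2.2 := lt_of_le_of_ne h12 hne
              rcases hy with _ | hy'
              · exact hlt12
              · have h2y : kv2.2 ≤ y.2 :=
                  (List.pairwise_cons.mp (List.pairwise_cons.mp hpair).2).1 y (by assumption)
                exact lt_of_lt_of_le hlt12 h2y
            have htail : (kv2 :: t).filter q = [] := by
              rw [List.filter_eq_nil_iff]
              intro y hy
              have := hlt y hy
              simp [hq, hmin]
              omega
            have h1 : ys.filter q = [kv1] := by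
              apply List.Perm.eq_singleton
              simpa [hq1, htail] using hfperm
            rw [h1]; simp [hne]

-- ===== VERDICT (by name: the statement is the Claim_ definition above) =====
theorem judge_max_score_label_spec : Claim_equal_judge_max_score_label := by
  intro l _
  unfold Spec_judge_max_score_label judge_max_score_label judge_max_score_label_alt
  have := core_eq (PySem.Dict.ofList l).items
  simpa [PySem.Dict.values] using this
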